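-- pv_equiv track=rewrite | github.com/jmelnich/algorithms | simulator.py | mirror
-- ===== SOURCE A (Python) =====
-- def mirror(servers_quantity):
-- 	servers = []
-- 	start = 1
-- 	end = start + 10
-- 	count = 0
-- 	for i in range(0, servers_quantity):
-- 		row = []
-- 		for j in range(start, end):
-- 			row.append(j)
-- 		count += 1
-- 		if count % 2 == 0:
-- 			start += 10
-- 			end = start + 10
-- 		servers.append(row)
-- 	return servers
-- ===== SOURCE B (Python) =====
-- def mirror(servers_quantity):
--     rows = []
--     row = list(range(1, 11))
--     for _ in range((servers_quantity + 1) // 2):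
--         rows.append(row)
--         rows.append(list(row))
--         row = [x + 10 for x in row]
--     return rows[:servers_quantity]
-- ===== Notes on version B (the rewrite author's own statement) =====
-- stated objective: alternative
-- what changed: Instead of emitting one row per iteration with start/end/count state and a parity test, B builds rows two at a time per block (the row and a copy of it, then shifts the row elementwise by +10), overproducing ceil(n/2) blocks and truncating with rows[:n].
import Mathlib
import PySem

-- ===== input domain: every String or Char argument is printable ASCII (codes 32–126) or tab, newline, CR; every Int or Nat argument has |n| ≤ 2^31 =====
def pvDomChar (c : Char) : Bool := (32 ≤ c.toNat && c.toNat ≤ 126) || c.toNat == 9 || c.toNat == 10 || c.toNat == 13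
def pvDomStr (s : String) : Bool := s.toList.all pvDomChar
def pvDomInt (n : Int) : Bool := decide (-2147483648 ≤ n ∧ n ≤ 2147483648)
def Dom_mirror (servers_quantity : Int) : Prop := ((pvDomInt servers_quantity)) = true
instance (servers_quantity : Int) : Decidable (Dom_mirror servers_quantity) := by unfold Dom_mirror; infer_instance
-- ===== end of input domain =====

-- B builds rows two at a time per block (a row and its copy, then the row shifted
-- elementwise by +10), overproducing ceil(n/2) blocks and truncating with rows[:n];
-- same cost, no per-row start/end/count bookkeeping.

-- ===== PORT A =====
-- state: (servers, start, end, count)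
def mirrorStep (st : List (List Int) × Int × Int × Int) (_i : Int) :
    List (List Int) × Int × Int × Int :=
  let (servers, start, stop, count) := st
  let row := (PySem.List.pyRange start stop 1).foldl (fun r j => r ++ [j]) []
  let count := count + 1
  let (start, stop) :=
    if PySem.Int.mod count 2 = 0 then (start + 10, start + 10 + 10) else (start, stop)
  (servers ++ [row], start, stop, count)

def mirror (servers_quantity : Int) : List (List Int) :=
  ((PySem.List.pyRange 0 servers_quantity 1).foldl mirrorStep ([], 1, 1 + 10, 0)).1

-- ===== PORT B =====
-- the 'for _ in range(blocks)' loop of Source B, counting the remaining blocks;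
-- state: accumulated rows and the current row
def mirrorAltLoop : Nat → List (List Int) → List Int → List (List Int)
  | 0, rows, _ => rows
  | k + 1, rows, row => mirrorAltLoop k (rows ++ [row, row]) (row.map (· + 10))

def mirror_alt (servers_quantity : Int) : List (List Int) :=
  let blocks := PySem.Int.floordiv (servers_quantity + 1) 2
  let rows := mirrorAltLoop blocks.toNat [] (PySem.List.pyRange 1 11 1)
  PySem.List.slice rows none (some servers_quantity)

-- ===== PRECONDITION & SPEC =====
def Spec_mirror (servers_quantity : Int) (out : List (List Int)) : Prop := out = mirror_alt servers_quantity
instance (servers_quantity : Int) (out : List (List Int)) : Decidable (Spec_mirror servers_quantity out) := by unfold Spec_mirror; infer_instance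

-- ===== CLAIM (what is proved, stated in full; the proofs are below) =====
def Claim_equal_mirror : Prop := ∀ (servers_quantity : Int), Dom_mirror servers_quantity → Spec_mirror servers_quantity (mirror servers_quantity)

-- ===== LEMMAS AND PROOFS =====

lemma foldl_snoc (l : List Int) (acc : List Int) :
    l.foldl (fun r j => r ++ [j]) acc = acc ++ l := by
  induction l generalizing acc with
  | nil => simp
  | cons x xs ih => simp [List.foldl, ih]

def rowAt (i : Int) : List Int :=
  PySem.List.pyRange (1 + 10 * PySem.Int.floordiv i 2) (11 + 10 * PySem.Int.floordiv i 2) 1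

lemma fdiv_two (x : Int) : PySem.Int.floordiv x 2 = x / 2 := by
  simp [PySem.Int.floordiv, Int.fdiv_eq_ediv]

lemma mirror_inv (m : Nat) :
    (PySem.List.pyRange 0 (m : Int) 1).foldl mirrorStep ([], 1, 1 + 10, 0) =
      ((PySem.List.pyRange 0 (m : Int) 1).map rowAt,
        1 + 10 * ((m / 2 : Nat) : Int), 11 + 10 * ((m / 2 : Nat) : Int), (m : Int)) := by
  induction m with
  | zero => simp
  | succ m ih =>
    have hsplit : PySem.List.pyRange 0 ((m + 1 : Nat) : Int) 1 =
        PySem.List.pyRange 0 (m : Int) 1 ++ [(m : Int)] := by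
      have := PySem.List.pyRange_one_succ_right (a := 0) (b := (m : Int)) (by positivity)
      push_cast
      push_cast at this
      exact this
    rw [hsplit, List.foldl_append, ih, List.map_append]
    simp only [List.foldl]
    unfold mirrorStep
    simp only [foldl_snoc, List.nil_append]
    have hmod : PySem.Int.mod ((m : Int) + 1) 2 = (((m + 1) % 2 : Nat) : Int) := by
      have := PySem.Int.mod_natCast (m + 1) 2
      push_cast at this ⊢
      omega
    rw [hmod]
    have h2 : PySem.Int.floordiv (m : Int) 2 = ((m / 2 : Nat) : Int) := by
      exact_mod_cast PySem.Int.floordiv_natCast m 2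
    have hrow : rowAt (m : Int) =
        PySem.List.pyRange (1 + 10 * ((m / 2 : Nat) : Int)) (11 + 10 * ((m / 2 : Nat) : Int)) 1 := by
      unfold rowAt
      rw [h2]
    by_cases hpar : (m + 1) % 2 = 0
    · have hc : (((m + 1) % 2 : Nat) : Int) = 0 := by exact_mod_cast hpar
      have hdiv : ((m + 1) / 2 : Nat) = m / 2 + 1 := by omega
      rw [if_pos hc]
      simp only [List.map_cons, List.map_nil, hrow, hdiv, Prod.mk.injEq]
      refine ⟨trivial, ?_, ?_, ?_⟩ <;> push_cast <;> omega
    · have hc : (((m + 1) % 2 : Nat) : Int) ≠ 0 := by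
        exact_mod_cast (by omega : ((m + 1) % 2 : Nat) ≠ 0)
      have hdiv : ((m + 1) / 2 : Nat) = m / 2 := by omega
      rw [if_neg hc]
      simp only [List.map_cons, List.map_nil, hrow, hdiv, Prod.mk.injEq]
      refine ⟨trivial, ?_, ?_, ?_⟩ <;> push_cast <;> omega

lemma map_add_ten (a b : Int) :
    (PySem.List.pyRange a b 1).map (· + 10) = PySem.List.pyRange (a + 10) (b + 10) 1 := by
  rw [PySem.List.pyRange_one a b, PySem.List.pyRange_one (a + 10) (b + 10)]
  have h : b + 10 - (a + 10) = b - a := by ring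
  rw [h, List.map_map]
  apply List.map_congr_left
  intro k _
  simp
  ring

lemma rowAt_even (c : Int) :
    rowAt (2 * c) = PySem.List.pyRange (1 + 10 * c) (11 + 10 * c) 1 := by
  unfold rowAt
  rw [fdiv_two]
  have : 2 * c / 2 = c := by omega
  rw [this]

lemma rowAt_odd (c : Int) :
    rowAt (2 * c + 1) = PySem.List.pyRange (1 + 10 * c) (11 + 10 * c) 1 := by
  unfold rowAt
  rw [fdiv_two]
  have : (2 * c + 1) / 2 = c := by omega
  rw [this]

lemma loop_eq (k : Nat) (c : Int) (rows : List (List Int)) :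
    mirrorAltLoop k rows (PySem.List.pyRange (1 + 10 * c) (11 + 10 * c) 1) =
      rows ++ (PySem.List.pyRange (2 * c) (2 * c + 2 * k) 1).map rowAt := by
  induction k generalizing c rows with
  | zero =>
    simp [mirrorAltLoop]
  | succ k ih =>
    have hshift : (PySem.List.pyRange (1 + 10 * c) (11 + 10 * c) 1).map (· + 10) =
        PySem.List.pyRange (1 + 10 * (c + 1)) (11 + 10 * (c + 1)) 1 := by
      rw [map_add_ten]
      congr 1 <;> ring
    rw [mirrorAltLoop, hshift, ih]
    have h1 : PySem.List.pyRange (2 * c) (2 * c + 2 * (k + 1 : Nat)) 1 =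
        (2 * c) :: (2 * c + 1) :: PySem.List.pyRange (2 * (c + 1)) (2 * (c + 1) + 2 * k) 1 := by
      rw [PySem.List.pyRange_one_cons (by push_cast; omega)]
      rw [PySem.List.pyRange_one_cons (by push_cast; omega)]
      congr 1
      congr 1
      congr 1 <;> push_cast <;> ring
    rw [h1]
    simp only [List.map_cons, rowAt_even, rowAt_odd]
    simp

lemma take_range_map (m : Nat) (M : Int) (hm : (m : Int) ≤ M) :
    ((PySem.List.pyRange 0 M 1).map rowAt).take m =
      (PySem.List.pyRange 0 (m : Int) 1).map rowAt := by
  rw [PySem.List.pyRange_one_append 0 (m : Int) M (by positivity) hm, List.map_append]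
  have hlen : ((PySem.List.pyRange 0 (m : Int) 1).map rowAt).length = m := by
    rw [List.length_map, PySem.List.length_pyRange_one]
    omega
  rw [List.take_left' hlen]

-- ===== VERDICT (by name: the statement is the Claim_ definition above) =====
theorem mirror_spec : Claim_equal_mirror := by
  intro n _
  unfold Spec_mirror mirror mirror_alt
  dsimp only
  by_cases hn : n ≤ 0
  · have hblocks : (PySem.Int.floordiv (n + 1) 2).toNat = 0 := by
      rw [fdiv_two]
      omega
    rw [PySem.List.pyRange_one_eq_nil hn, hblocks]
    simp [mirrorAltLoop, PySem.List.slice]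
  · obtain ⟨m, rfl⟩ : ∃ m : Nat, n = (m : Int) := ⟨n.toNat, by omega⟩
    rw [mirror_inv m]
    have hblocks : (PySem.Int.floordiv ((m : Int) + 1) 2).toNat = (m + 1) / 2 := by
      rw [fdiv_two]
      omega
    rw [hblocks]
    have hstart : PySem.List.pyRange 1 11 1 =
        PySem.List.pyRange (1 + 10 * (0 : Int)) (11 + 10 * (0 : Int)) 1 := by norm_num
    rw [hstart, loop_eq ((m + 1) / 2) 0 [], List.nil_append]
    have h0 : (2 : Int) * 0 = 0 := by ring
    rw [h0]
    have hM : (0 : Int) + 2 * ((m + 1) / 2 : Nat) = ((2 * ((m + 1) / 2) : Nat) : Int) := by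
      push_cast; ring
    rw [hM, PySem.List.slice_to_natCast, take_range_map m _ (by push_cast; omega)]
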